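-- pv_equiv track=rewrite | github.com/Coni63/CG_repo | training/easy/disordered-first-contact.py | getNumberPieces
-- ===== SOURCE A (Python) =====
-- def getNumberPieces(x):
--     i = 1
--     s = 1
--     l = [1]
--     while len(x) > s:
--         i += 1
--         s += i
--         l.append(min(i, i+len(x)-s))
--     return l[::-1]
-- ===== SOURCE B (Python) =====
-- def getNumberPieces(x):
--     n = len(x)
--     if n <= 1:
--         return [1]
--     # binary search for the smallest k with k*(k+1)//2 >= n
--     lo, hi = 1, n
--     while lo < hi:
--         mid = (lo + hi) // 2
--         if mid * (mid + 1) // 2 >= n: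
--             hi = mid
--         else:
--             lo = mid + 1
--     v = lo + n - lo * (lo + 1) // 2
--     return [v] + list(range(lo - 1, 0, -1))
-- ===== Notes on version B (the rewrite author's own statement) =====
-- stated objective: alternative
-- what changed: A grows the list layer by layer with a running triangular sum in a while loop; B binary-searches for the smallest layer count k with k*(k+1)//2 >= len(x) and builds the reversed answer directly as [cap] + range(k-1, 0, -1).
import Mathlib
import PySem

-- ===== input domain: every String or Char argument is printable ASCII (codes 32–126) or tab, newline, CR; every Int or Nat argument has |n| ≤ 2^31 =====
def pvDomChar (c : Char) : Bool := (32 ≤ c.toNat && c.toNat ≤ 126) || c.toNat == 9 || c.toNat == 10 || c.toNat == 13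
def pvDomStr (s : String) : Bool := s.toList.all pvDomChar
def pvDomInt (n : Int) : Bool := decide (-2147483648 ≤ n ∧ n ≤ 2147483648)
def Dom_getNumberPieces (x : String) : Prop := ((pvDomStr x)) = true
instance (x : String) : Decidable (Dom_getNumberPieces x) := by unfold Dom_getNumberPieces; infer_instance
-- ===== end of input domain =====

-- B replaces A's step-by-step accumulation (a while loop growing the list with a
-- running triangular sum) by a binary search for the layer count k followed by a
-- direct construction of the answer; equality of return values is proved for every input.

-- ===== PORT A =====
-- A's while loop; `i` only ever takes the values 1,2,3,…, so it is carried as a Nat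
-- (cast to Int where Python uses it) to justify termination; `s`,`l` are as in A.
def pvLoopA (n : Int) (i : Nat) (s : Int) (l : List Int) : List Int :=
  if n > s then
    pvLoopA n (i + 1) (s + ((i : Int) + 1))
      (l ++ [min ((i : Int) + 1) (((i : Int) + 1) + n - (s + ((i : Int) + 1)))])
  else l
termination_by (n - s).toNat
decreasing_by
  have : (0:Int) ≤ (i : Int) := Int.natCast_nonneg i
  omega

def getNumberPieces (x : String) : List Int :=
  (PySem.List.slice? (pvLoopA (PySem.Str.len x) 1 1 [1]) none none (-1)).getD []

-- ===== PORT B =====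
-- Source B's binary-search loop for the smallest k with k*(k+1)//2 >= n.
def pvBsLoop (n lo hi : Int) : Int :=
  if h : lo < hi then
    let mid := PySem.Int.floordiv (lo + hi) 2
    if PySem.Int.floordiv (mid * (mid + 1)) 2 ≥ n then pvBsLoop n lo mid
    else pvBsLoop n (mid + 1) hi
  else lo
termination_by (hi - lo).toNat
decreasing_by
  · have h1 : PySem.Int.floordiv (lo + hi) 2 < hi :=
      (PySem.Int.floordiv_lt_iff_lt_mul (by omega)).mpr (by omega)
    omega
  · have h2 : lo ≤ PySem.Int.floordiv (lo + hi) 2 :=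
      (PySem.Int.le_floordiv_iff_mul_le (by omega)).mpr (by omega)
    omega

def getNumberPieces_alt (x : String) : List Int :=
  let n := PySem.Str.len x
  if n ≤ 1 then [1]
  else
    let k := pvBsLoop n 1 n
    let v := k + n - PySem.Int.floordiv (k * (k + 1)) 2
    v :: PySem.List.pyRange (k - 1) 0 (-1)

-- ===== PRECONDITION & SPEC =====
def Spec_getNumberPieces (x : String) (out : List Int) : Prop := out = getNumberPieces_alt x
instance (x : String) (out : List Int) : Decidable (Spec_getNumberPieces x out) := by unfold Spec_getNumberPieces; infer_instance

-- ===== CLAIM (what is proved, stated in full; the proofs are below) =====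
def Claim_equal_getNumberPieces : Prop := ∀ (x : String), Dom_getNumberPieces x → Spec_getNumberPieces x (getNumberPieces x)

-- ===== LEMMAS AND PROOFS =====

-- k*(k+1) is even, so Python's k*(k+1)//2 is exact: 2 * (k*(k+1)//2) = k*(k+1).
lemma pvTri_exact (k : Int) : 2 * PySem.Int.floordiv (k * (k + 1)) 2 = k * (k + 1) := by
  have hm : PySem.Int.mod (k * (k + 1)) 2 = 0 :=
    (PySem.Int.mod_eq_zero_iff_dvd _ _).mpr (Int.even_mul_succ_self k).two_dvd
  have h := PySem.Int.floordiv_mul_add_mod (k * (k + 1)) 2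
  linarith

-- The binary search returns some k ≥ 1 with (k-1)*k < 2n ≤ k*(k+1).
lemma pvBsLoop_spec (n : Int) : ∀ (m : Nat) (lo hi : Int), (hi - lo).toNat = m →
    1 ≤ lo → lo ≤ hi → (lo - 1) * lo < 2 * n → 2 * n ≤ hi * (hi + 1) →
    1 ≤ pvBsLoop n lo hi ∧ (pvBsLoop n lo hi - 1) * pvBsLoop n lo hi < 2 * n ∧
      2 * n ≤ pvBsLoop n lo hi * (pvBsLoop n lo hi + 1) := by
  intro m
  induction m using Nat.strong_induction_on with
  | _ m ih =>
    intro lo hi hm h1 hle hlo hhi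
    rw [pvBsLoop]
    by_cases h : lo < hi
    · rw [dif_pos h]
      have hmlt : PySem.Int.floordiv (lo + hi) 2 < hi :=
        (PySem.Int.floordiv_lt_iff_lt_mul (by omega)).mpr (by omega)
      have hmge : lo ≤ PySem.Int.floordiv (lo + hi) 2 :=
        (PySem.Int.le_floordiv_iff_mul_le (by omega)).mpr (by omega)
      set mid := PySem.Int.floordiv (lo + hi) 2 with hmid
      have htri := pvTri_exact mid
      show (1 ≤ (if PySem.Int.floordiv (mid * (mid + 1)) 2 ≥ n then pvBsLoop n lo mid
        else pvBsLoop n (mid + 1) hi)) ∧ _ ∧ _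
      by_cases hc : PySem.Int.floordiv (mid * (mid + 1)) 2 ≥ n
      · rw [if_pos hc]
        have hge : 2 * n ≤ mid * (mid + 1) := by linarith
        exact ih (mid - lo).toNat (by omega) lo mid rfl h1 hmge hlo hge
      · rw [if_neg hc]
        rw [not_le] at hc
        have hlt : mid * (mid + 1) < 2 * n := by linarith
        exact ih (hi - (mid + 1)).toNat (by omega) (mid + 1) hi rfl (by omega)
          (by omega) (by nlinarith) hhi
    · rw [dif_neg h]
      have : lo = hi := le_antisymm hle (by omega)
      subst this
      exact ⟨h1, hlo, hhi⟩

-- Characterisation of A's loop: starting at layer j < k with s the j-th triangular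
-- number, the loop appends j+1, …, k-1 and then the capped value v, where k is the
-- first layer whose triangular number reaches n.
lemma pvLoopA_spec (n k v : Int) (hkl : (k - 1) * k < 2 * n) (hku : 2 * n ≤ k * (k + 1))
    (hv : 2 * v = 2 * k + 2 * n - k * (k + 1)) :
    ∀ (m : Nat) (j : Nat) (s : Int) (l : List Int), (k - (j : Int)).toNat = m →
    1 ≤ (j : Int) → (j : Int) < k → 2 * s = (j : Int) * ((j : Int) + 1) →
    pvLoopA n j s l = l ++ PySem.List.pyRange ((j : Int) + 1) k 1 ++ [v] := by
  intro m
  induction m using Nat.strong_induction_on with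
  | _ m ih =>
    intro j s l hm hj1 hjk hs
    have hmono0 : (j : Int) * ((j : Int) + 1) ≤ (k - 1) * k := by
      nlinarith [mul_nonneg (show (0:Int) ≤ k - 1 - (j : Int) by omega)
        (show (0:Int) ≤ k + (j : Int) by omega)]
    have hsn : n > s := by linarith
    rw [pvLoopA, if_pos hsn]
    by_cases hcase : (j : Int) + 1 < k
    · -- another full layer: the appended value is j+1
      have hs' : 2 * (s + ((j : Int) + 1)) = ((j : Int) + 1) * (((j : Int) + 1) + 1) := by
        linear_combination hs
      have hmono : ((j : Int) + 1) * (((j : Int) + 1) + 1) ≤ (k - 1) * k := by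
        nlinarith [mul_nonneg (show (0:Int) ≤ k - (j : Int) - 2 by omega)
          (show (0:Int) ≤ k + (j : Int) + 1 by omega)]
      have hsn' : s + ((j : Int) + 1) < n := by linarith
      rw [min_eq_left (by omega)]
      have hrec := ih (k - ((j : Int) + 1)).toNat (by omega) (j + 1) (s + ((j : Int) + 1))
        (l ++ [(j : Int) + 1]) (by push_cast; omega) (by push_cast; omega)
        (by push_cast; omega) (by push_cast; linear_combination hs)
      push_cast at hrec
      rw [hrec, PySem.List.pyRange_one_cons hcase]
      simp
    · -- last step: j+1 = k, appended value is the cap v, then the loop exits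
      have hjk1 : (j : Int) + 1 = k := by omega
      have h2s : 2 * (s + ((j : Int) + 1)) = k * (k + 1) := by
        rw [← hjk1]; linear_combination hs
      have hsge : ¬ (n > s + ((j : Int) + 1)) := by
        rw [not_lt]; linarith
      have hminv : min ((j : Int) + 1) (((j : Int) + 1) + n - (s + ((j : Int) + 1))) = v := by
        rw [min_eq_right (by linarith)]
        linarith
      rw [hminv, pvLoopA, if_neg hsge, PySem.List.pyRange_one_eq_nil (by omega)]
      simp

-- ===== VERDICT (by name: the statement is the Claim_ definition above) =====
theorem getNumberPieces_spec : Claim_equal_getNumberPieces := by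
  intro x _
  unfold Spec_getNumberPieces getNumberPieces getNumberPieces_alt
  rw [PySem.List.slice?_none_none_neg_one]
  simp only [Option.getD_some]
  have hn0 : 0 ≤ PySem.Str.len x := by
    rw [PySem.Str.len_eq]; positivity
  set n := PySem.Str.len x with hn
  by_cases h1 : n ≤ 1
  · rw [pvLoopA, if_neg (by omega), if_pos h1]
    rfl
  · -- n ≥ 2
    rw [if_neg h1]
    have hn2 : 2 ≤ n := by omega
    obtain ⟨hk1, hkl, hku⟩ := pvBsLoop_spec n (n - 1).toNat 1 n rfl le_rfl
      (by omega) (by linarith) (by nlinarith)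
    set k := pvBsLoop n 1 n with hk
    have hk2 : 2 ≤ k := by
      by_contra hcon
      have : k = 1 := by omega
      rw [this] at hku; norm_num at hku; omega
    have htri := pvTri_exact k
    set v := k + n - PySem.Int.floordiv (k * (k + 1)) 2 with hv
    have hveq : 2 * v = 2 * k + 2 * n - k * (k + 1) := by rw [hv]; linarith
    have hA := pvLoopA_spec n k v hkl hku hveq (k - 1).toNat 1 1 [1]
      (by norm_num) (by norm_num) (by push_cast; omega) (by norm_num)
    push_cast at hA
    rw [hA, PySem.List.pyRange_neg_one_eq_reverse]
    rw [show (0:Int) + 1 = 1 by norm_num, show k - 1 + 1 = k by ring]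
    rw [PySem.List.pyRange_one_append 1 2 k (by omega) (by omega),
      show (2:Int) = 1 + 1 by norm_num, PySem.List.pyRange_one_singleton]
    simp
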